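-- pv_equiv track=rewrite | github.com/samizwei/GPU_ViT_Calcs | models/Afm_Model_functions.py | sublattice
-- ===== SOURCE A (Python) =====
-- def sublattice(L):
--     """
--     this function returns the indices of the sites on one of the sublattices of the biparitte lattice in the
--     limit J3 = 0.0
--
--     inputs:
--     L: linear dimension of the triangular lattice
--
--     returns:
--     sub_A: (list) indices of the sublattice A
--     """
--     total_sites = L**2
--     sub_A = []
--     for j in range(0, total_sites, L):
--         if j % (2*L) == 0:
--             for i in range(j, j+L, 2):
--                 sub_A.append(i)
--         else:
--             for i in range(j+1, j+L, 2):
--                 sub_A.append(i)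
--     return sub_A
-- ===== SOURCE B (Python) =====
-- def sublattice(L):
--     if L <= 0:
--         return []
--     return [n for n in range(L * L) if (n // L + n % L) % 2 == 0]
-- ===== Notes on version B (the rewrite author's own statement) =====
-- stated objective: simpler
-- what changed: Replaces the nested row-loop with parity-dependent step-2 inner ranges by one flat scan over all L*L site indices keeping n exactly when (n//L + n%L) is even (checkerboard predicate).
-- outside the precondition, e.g. on sublattice(0): A raises ValueError, B returns []
import Mathlib
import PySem

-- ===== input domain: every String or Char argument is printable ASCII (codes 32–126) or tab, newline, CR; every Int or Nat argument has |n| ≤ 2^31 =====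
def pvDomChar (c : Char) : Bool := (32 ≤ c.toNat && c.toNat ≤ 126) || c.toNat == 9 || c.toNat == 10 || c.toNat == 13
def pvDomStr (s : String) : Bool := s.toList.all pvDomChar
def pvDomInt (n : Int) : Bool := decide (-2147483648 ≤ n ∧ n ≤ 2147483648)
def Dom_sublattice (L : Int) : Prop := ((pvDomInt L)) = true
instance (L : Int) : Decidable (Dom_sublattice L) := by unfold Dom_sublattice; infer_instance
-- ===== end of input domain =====

-- B replaces A's nested row loop (parity-dependent step-2 inner ranges) by one flat
-- scan over all L*L site indices keeping n when (n//L + n%L) is even; objective: simpler.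

-- ===== PORT A =====
def sublattice (L : Int) : List Int :=
  (PySem.List.pyRange 0 (L ^ 2) L).foldl
    (fun subA j =>
      if PySem.Int.mod j (2 * L) == 0 then
        (PySem.List.pyRange j (j + L) 2).foldl (fun acc i => acc ++ [i]) subA
      else
        (PySem.List.pyRange (j + 1) (j + L) 2).foldl (fun acc i => acc ++ [i]) subA)
    []

-- ===== PORT B =====
def sublattice_alt (L : Int) : List Int :=
  if L ≤ 0 then []
  else
    (PySem.List.pyRange 0 (L * L) 1).filter
      (fun n => PySem.Int.mod (PySem.Int.floordiv n L + PySem.Int.mod n L) 2 == 0)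

-- ===== PRECONDITION & SPEC =====
-- Pre_ excludes only L = 0, where Python's range(0, 0, 0) raises ValueError (step zero).
def Pre_sublattice (L : Int) : Prop := L ≠ 0
instance (L : Int) : Decidable (Pre_sublattice L) := by unfold Pre_sublattice; infer_instance
def pvWitness_sublattice : Int := 3

def Spec_sublattice (L : Int) (out : List Int) : Prop := out = sublattice_alt L
instance (L : Int) (out : List Int) : Decidable (Spec_sublattice L out) := by unfold Spec_sublattice; infer_instance

-- ===== CLAIM (what is proved, stated in full; the proofs are below) =====
def Claim_equal_sublattice : Prop := ∀ (L : Int), Dom_sublattice L → Pre_sublattice L → Spec_sublattice L (sublattice L)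

-- ===== LEMMAS AND PROOFS =====

-- step-2 range: cons and nil forms
lemma pyRange_two_cons (c d : Int) (h : c < d) :
    PySem.List.pyRange c d 2 = c :: PySem.List.pyRange (c + 2) d 2 := by
  rw [PySem.List.pyRange_of_pos _ _ (by norm_num), PySem.List.pyRange_of_pos _ _ (by norm_num)]
  rw [if_pos h]
  by_cases h2 : c + 2 < d
  · rw [if_pos h2]
    have hlen : ((d - c + 2 - 1)/2).toNat = ((d - (c+2) + 2 - 1)/2).toNat + 1 := by omega
    rw [hlen, List.range_succ_eq_map, List.map_cons, List.map_map]
    refine congrArg₂ _ (by ring) (List.map_congr_left ?_)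
    intro k _
    simp [Function.comp, Nat.succ_eq_add_one]
    ring
  · rw [if_neg h2]
    have hlen : ((d - c + 2 - 1)/2).toNat = 1 := by omega
    rw [hlen]
    simp

lemma pyRange_two_nil (c d : Int) (h : d ≤ c) : PySem.List.pyRange c d 2 = [] := by
  rw [PySem.List.pyRange_of_pos _ _ (by norm_num), if_neg (by omega)]
  simp

-- parity filter of a unit-step range is a step-2 range
lemma filter_parity_core (m : Nat) (c d e : Int) (hm : d - c ≤ m) :
    (PySem.List.pyRange c d 1).filter (fun n => decide ((e + n) % 2 = 0)) =
      PySem.List.pyRange (if (e + c) % 2 = 0 then c else c + 1) d 2 := by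
  induction m generalizing c with
  | zero =>
    rw [PySem.List.pyRange_one_eq_nil (by omega)]
    split_ifs <;> rw [pyRange_two_nil _ _ (by omega)] <;> rfl
  | succ m ih =>
    by_cases hcd : c < d
    · rw [PySem.List.pyRange_one_cons hcd, List.filter_cons]
      have htail := ih (c + 1) (by omega)
      by_cases hp : (e + c) % 2 = 0
      · rw [if_pos hp]
        simp only [hp, decide_true, if_true]
        rw [htail]
        rw [if_neg (show ¬ (e + (c + 1)) % 2 = 0 by omega)]
        rw [pyRange_two_cons c d hcd]
        congr 2
        ring
      · rw [if_neg hp]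
        simp only [hp, decide_false, Bool.false_eq_true, if_false]
        rw [htail]
        rw [if_pos (show (e + (c + 1)) % 2 = 0 by omega)]
    · rw [PySem.List.pyRange_one_eq_nil (by omega)]
      split_ifs <;> rw [pyRange_two_nil _ _ (by omega)] <;> rfl

-- a row of A is the filtered row of B
lemma row_lemma (L : Int) (hL : 0 < L) (r : Nat) :
    (if PySem.Int.mod (L * r) (2 * L) == 0 then
        PySem.List.pyRange (L * r) (L * r + L) 2
      else
        PySem.List.pyRange (L * r + 1) (L * r + L) 2) =
      (PySem.List.pyRange (L * r) (L * r + L) 1).filter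
        (fun n => PySem.Int.mod (PySem.Int.floordiv n L + PySem.Int.mod n L) 2 == 0) := by
  have hmod : PySem.Int.mod (L * r) (2 * L) = L * ((r : Int) % 2) := by
    rw [PySem.Int.mod_eq_emod_of_pos (by omega), show (2 * L : Int) = L * 2 by ring]
    exact Int.mul_emod_mul_of_pos _ _ hL
  have hfilter :
      (PySem.List.pyRange (L * r) (L * r + L) 1).filter
          (fun n => PySem.Int.mod (PySem.Int.floordiv n L + PySem.Int.mod n L) 2 == 0) =
        (PySem.List.pyRange (L * r) (L * r + L) 1).filter
          (fun n => decide (((r : Int) - L * r + n) % 2 = 0)) := by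
    refine List.filter_congr ?_
    intro n hn
    rw [PySem.List.mem_pyRange_one] at hn
    have hdiv : PySem.Int.floordiv n L = (r : Int) := by
      rw [PySem.Int.floordiv_eq_iff_of_pos hL]
      constructor
      · linarith [hn.1]
      · linarith [hn.2]
    have hmodn : PySem.Int.mod n L = n - L * r := by
      have h := PySem.Int.floordiv_mul_add_mod n L
      rw [hdiv] at h
      linarith
    rw [hdiv, hmodn, PySem.Int.mod_eq_emod_of_pos (by norm_num),
      show ((r : Int) + (n - L * r)) = ((r : Int) - L * r + n) by ring,
      Bool.beq_eq_decide_eq]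
  rw [hfilter, filter_parity_core (L + 1).toNat _ _ _ (by omega)]
  have hpar : ((r : Int) - L * ↑r + L * ↑r) % 2 = (r : Int) % 2 := by
    congr 1; ring
  by_cases hr : (r : Int) % 2 = 0
  · rw [if_pos (show ((r : Int) - L * ↑r + L * ↑r) % 2 = 0 by rw [hpar]; exact hr)]
    have hcond : (PySem.Int.mod (L * ↑r) (2 * L) == 0) = true := by
      rw [hmod, hr]; simp
    rw [hcond]
    simp
  · rw [if_neg (show ¬ ((r : Int) - L * ↑r + L * ↑r) % 2 = 0 by rw [hpar]; exact hr)]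
    have hcond : (PySem.Int.mod (L * ↑r) (2 * L) == 0) = false := by
      rw [hmod]
      simp only [beq_eq_false_iff_ne, ne_eq, mul_eq_zero]
      rintro (h1 | h1) <;> omega
    rw [hcond]
    simp

-- main induction over the rows
lemma rows_lemma (L : Int) (hL : 0 < L) (r : Nat) :
    ((List.range r).map (fun (k : Nat) => L * (k : Int))).flatMap
        (fun j => if PySem.Int.mod j (2 * L) == 0 then
            PySem.List.pyRange j (j + L) 2
          else
            PySem.List.pyRange (j + 1) (j + L) 2) =
      (PySem.List.pyRange 0 (L * r) 1).filter
        (fun n => PySem.Int.mod (PySem.Int.floordiv n L + PySem.Int.mod n L) 2 == 0) := by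
  induction r with
  | zero => simp [PySem.List.pyRange_one_eq_nil]
  | succ r ih =>
    rw [List.range_succ, List.map_append, List.flatMap_append, ih]
    rw [PySem.List.pyRange_one_append 0 (L * r) (L * ((r : Nat) + 1 : Nat))
      (by positivity) (by push_cast; nlinarith)]
    rw [List.filter_append]
    congr 1
    simp only [List.map_cons, List.map_nil, List.flatMap_cons, List.flatMap_nil, List.append_nil]
    push_cast
    rw [show L * ((r : Int) + 1) = L * r + L by ring]
    exact row_lemma L hL r

-- the step-L outer range is the list of row origins
lemma outer_range (L : Int) (hL : 0 < L) :
    PySem.List.pyRange 0 (L ^ 2) L = (List.range L.toNat).map (fun (k : Nat) => L * (k : Int)) := by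
  rw [PySem.List.pyRange_of_pos _ _ hL, if_pos (by positivity)]
  have hlen : ((L ^ 2 - 0 + L - 1) / L).toNat = L.toNat := by
    rw [show L ^ 2 - 0 + L - 1 = (L - 1) + L * L by ring,
      Int.add_mul_ediv_left _ _ (show L ≠ 0 by omega)]
    rw [Int.ediv_eq_zero_of_lt (show (0:Int) ≤ L - 1 by omega) (show L - 1 < L by omega)]
    omega
  rw [hlen]
  simp

-- ===== VERDICT (by name: the statement is the Claim_ definition above) =====
theorem sublattice_spec : Claim_equal_sublattice := by
  intro L _ hpre
  unfold Spec_sublattice sublattice sublattice_alt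
  by_cases hL : L ≤ 0
  · -- L < 0 (L = 0 is outside Pre_): the outer range is empty, both sides are []
    rw [if_pos hL]
    have hnil : PySem.List.pyRange 0 (L ^ 2) L = [] := by
      simp [PySem.List.pyRange, show ¬ (0:Int) < L by omega,
        show ¬ L ^ 2 < 0 by nlinarith [sq_nonneg L]]
    simp [hnil]
  · push_neg at hL
    rw [if_neg (by omega)]
    rw [outer_range L hL]
    simp only [PySem.List.foldl_append_singleton]
    have hbody : ∀ (subA : List Int) (j : Int),
        (if PySem.Int.mod j (2 * L) == 0 then
            subA ++ PySem.List.pyRange j (j + L) 2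
          else
            subA ++ PySem.List.pyRange (j + 1) (j + L) 2) =
          subA ++ (if PySem.Int.mod j (2 * L) == 0 then
            PySem.List.pyRange j (j + L) 2
          else
            PySem.List.pyRange (j + 1) (j + L) 2) := by
      intro subA j; split_ifs <;> rfl
    simp only [hbody]
    rw [PySem.List.foldl_append_eq_flatMap, List.nil_append]
    rw [rows_lemma L hL L.toNat, show L * (L.toNat : Int) = L * L by congr 1; omega]
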